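-- pv_equiv track=rewrite | github.com/busenaz-code-learner/Bilkent-EEE-212---Microprocessors-Labs | Lab 2/decode_encode.py | generate_pivot_alphabet
-- ===== SOURCE A (Python) =====
-- from typing import List
--
-- alphabet = list("ABCDEFGHIJKLMNOPQRSTUVWXYZ")
--
-- def generate_pivot_alphabet(pivot: int) -> List[str]:
--     alphabet_size = len(alphabet)
--     new_alphabet = alphabet_size * [""]
--
--     for idx, letter in enumerate(alphabet):
--         diff = pivot - idx
--         new_letter_idx = (pivot + diff) % alphabet_size
--         new_alphabet[idx] = alphabet[new_letter_idx]
--     return new_alphabet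
-- ===== SOURCE B (Python) =====
-- from typing import List
--
-- alphabet = list("ABCDEFGHIJKLMNOPQRSTUVWXYZ")
--
-- def generate_pivot_alphabet(pivot: int) -> List[str]:
--     # closed-form: output[idx] = alphabet[(2*pivot - idx) % 26]; with k = (2*pivot) % 26
--     # this is alphabet[k], alphabet[k-1], ..., alphabet[0], alphabet[25], ..., alphabet[k+1]
--     k = (2 * pivot) % len(alphabet)
--     return alphabet[k::-1] + alphabet[:k:-1]
-- ===== Notes on version B (the rewrite author's own statement) =====
-- stated objective: simpler
-- what changed: Replaces the per-index modular-arithmetic loop with one modulus computation and two reverse slices of the alphabet concatenated.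
import Mathlib
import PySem

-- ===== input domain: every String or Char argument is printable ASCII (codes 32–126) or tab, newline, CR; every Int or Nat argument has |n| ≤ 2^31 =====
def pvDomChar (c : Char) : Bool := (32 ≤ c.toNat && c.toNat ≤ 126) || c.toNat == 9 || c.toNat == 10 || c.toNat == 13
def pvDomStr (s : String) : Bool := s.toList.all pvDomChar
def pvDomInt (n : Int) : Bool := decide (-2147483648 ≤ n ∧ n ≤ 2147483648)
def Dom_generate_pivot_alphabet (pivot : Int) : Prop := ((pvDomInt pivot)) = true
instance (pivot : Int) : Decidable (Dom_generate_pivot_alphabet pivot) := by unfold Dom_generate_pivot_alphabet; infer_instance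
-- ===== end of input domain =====

-- B replaces A's per-index modular-arithmetic loop by one modulus and two reverse slices (simpler).

-- module-level constant: alphabet = list("ABCDEFGHIJKLMNOPQRSTUVWXYZ")
def pyAlphabet : List String :=
  ["A","B","C","D","E","F","G","H","I","J","K","L","M",
   "N","O","P","Q","R","S","T","U","V","W","X","Y","Z"]

-- ===== PORT A =====
-- loop over enumerate(alphabet); the index (pivot + diff) % 26 is always in 0..25, so
-- alphabet[new_letter_idx] is ported with the total pyGetD (exact here: never an IndexError);
-- likewise the assignment new_alphabet[idx] = … uses pySetD (idx ∈ 0..25).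
def generate_pivot_alphabet (pivot : Int) : List String :=
  (PySem.List.enumerate pyAlphabet 0).foldl
    (fun new_alphabet p =>
      let idx := p.1
      let diff := pivot - idx
      let new_letter_idx := PySem.Int.mod (pivot + diff) 26
      PySem.List.pySetD new_alphabet idx (PySem.List.pyGetD pyAlphabet new_letter_idx ""))
    (List.replicate 26 "")

-- ===== PORT B =====
-- k = (2*pivot) % 26; alphabet[k::-1] + alphabet[:k:-1]   (step -1 ≠ 0, so slice? is always some)
def generate_pivot_alphabet_alt (pivot : Int) : List String :=
  let k := PySem.Int.mod (2 * pivot) 26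
  (PySem.List.slice? pyAlphabet (some k) none (-1)).getD []
    ++ (PySem.List.slice? pyAlphabet none (some k) (-1)).getD []

-- ===== PRECONDITION & SPEC =====
def Spec_generate_pivot_alphabet (pivot : Int) (out : List String) : Prop := out = generate_pivot_alphabet_alt pivot
instance (pivot : Int) (out : List String) : Decidable (Spec_generate_pivot_alphabet pivot out) := by unfold Spec_generate_pivot_alphabet; infer_instance

-- ===== CLAIM (what is proved, stated in full; the proofs are below) =====
def Claim_equal_generate_pivot_alphabet : Prop := ∀ (pivot : Int), Dom_generate_pivot_alphabet pivot → Spec_generate_pivot_alphabet pivot (generate_pivot_alphabet pivot)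

-- ===== LEMMAS AND PROOFS =====

-- every modulus A takes has the form (p + (p - i)) % 26, which only depends on p % 13
theorem pvModKeyA (p i : Int) :
    PySem.Int.mod (p + (p - i)) 26 = PySem.Int.mod (p % 13 + (p % 13 - i)) 26 := by
  rw [PySem.Int.mod_eq_emod_of_pos (by norm_num),
      PySem.Int.mod_eq_emod_of_pos (by norm_num)]
  omega

theorem pvModKeyB (p : Int) :
    PySem.Int.mod (2 * p) 26 = PySem.Int.mod (2 * (p % 13)) 26 := by
  rw [PySem.Int.mod_eq_emod_of_pos (by norm_num),
      PySem.Int.mod_eq_emod_of_pos (by norm_num)]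
  omega

theorem pvA_shift (p : Int) :
    generate_pivot_alphabet p = generate_pivot_alphabet (p % 13) := by
  simp only [generate_pivot_alphabet]
  congr 1
  funext acc pr
  rw [pvModKeyA]

theorem pvB_shift (p : Int) :
    generate_pivot_alphabet_alt p = generate_pivot_alphabet_alt (p % 13) := by
  simp only [generate_pivot_alphabet_alt]
  rw [pvModKeyB]

-- ===== VERDICT (by name: the statement is the Claim_ definition above) =====
set_option maxRecDepth 10000 in
theorem generate_pivot_alphabet_spec : Claim_equal_generate_pivot_alphabet := by
  intro pivot _
  unfold Spec_generate_pivot_alphabet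
  rw [pvA_shift, pvB_shift]
  have h0 : 0 ≤ pivot % 13 := Int.emod_nonneg _ (by norm_num)
  have h1 : pivot % 13 < 13 := Int.emod_lt_of_pos _ (by norm_num)
  interval_cases h : (pivot % 13) <;> decide
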